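-- pv_equiv track=rewrite | github.com/pypi-data/pypi-mirror-345 | packages/kubectl-mcp-tool/kubectl_mcp_tool-1.1.1-py3-none-any.whl/kubectl_mcp_tool/core/tools.py | is_pipe_command
-- ===== SOURCE A (Python) =====
-- def is_pipe_command(command: str) -> bool:
--     """Check if a command contains pipe operators.
--
--     Args:
--         command: Command string
--
--     Returns:
--         True if the command contains pipe operators, False otherwise
--     """
--     in_single_quote = False
--     in_double_quote = False
--
--     for char in command:
--         if char == "'" and not in_double_quote:
--             in_single_quote = not in_single_quote
--         elif char == '"' and not in_single_quote:
--             in_double_quote = not in_double_quote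
--         elif char == '|' and not in_single_quote and not in_double_quote:
--             return True
--
--     return False
-- ===== SOURCE B (Python) =====
-- def is_pipe_command(command: str) -> bool:
--     i = 0
--     n = len(command)
--     while i < n:
--         c = command[i]
--         i += 1
--         if c == '|':
--             return True
--         if c == "'" or c == '"':
--             j = command.find(c, i)
--             if j == -1:
--                 return False
--             i = j + 1
--     return False
-- ===== Notes on version B (the rewrite author's own statement) =====
-- stated objective: alternative
-- what changed: Replaces the two-boolean quote-state machine with a stateless skip loop: on an opening quote it jumps directly past the matching same-type closing quote via str.find, so no per-character flag toggling is needed.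
import Mathlib
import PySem

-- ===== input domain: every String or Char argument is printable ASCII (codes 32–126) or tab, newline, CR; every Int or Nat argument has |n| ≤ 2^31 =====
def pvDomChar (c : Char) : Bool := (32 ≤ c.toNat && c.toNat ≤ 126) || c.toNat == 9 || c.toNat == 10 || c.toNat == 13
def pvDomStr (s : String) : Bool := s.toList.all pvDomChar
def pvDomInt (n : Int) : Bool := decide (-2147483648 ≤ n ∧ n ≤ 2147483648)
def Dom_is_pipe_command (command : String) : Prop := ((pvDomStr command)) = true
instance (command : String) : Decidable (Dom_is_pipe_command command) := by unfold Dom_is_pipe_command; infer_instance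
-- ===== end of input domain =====

-- B replaces A's two-boolean quote-state machine with a stateless loop that skips each
-- quoted span in one jump to the matching closing quote (objective: alternative).


-- ===== PORT A =====
-- literal transliteration of A's for-loop with the two quote flags
def pvLoopA : List Char → Bool → Bool → Bool
  | [], _, _ => false
  | c :: rest, s, d =>
    if c = '\'' ∧ d = false then pvLoopA rest (!s) d
    else if c = '"' ∧ s = false then pvLoopA rest s (!d)
    else if c = '|' ∧ s = false ∧ d = false then true
    else pvLoopA rest s d

def is_pipe_command (command : String) : Bool := pvLoopA command.toList false false

-- ===== PORT B =====
-- literal transliteration of Source B: index i into the string; command.find(c, i) → findIdx? on drop (i+1)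
def pvLoopB (l : List Char) (i : Nat) : Bool :=
  if h : i < l.length then
    let c := l[i]
    if c = '|' then true
    else if c = '\'' ∨ c = '"' then
      match (l.drop (i + 1)).findIdx? (· = c) with
      | none => false
      | some j => pvLoopB l (i + 1 + j + 1)
    else pvLoopB l (i + 1)
  else false
termination_by l.length - i
decreasing_by
  · omega
  · omega

def is_pipe_command_alt (command : String) : Bool := pvLoopB command.toList 0

-- ===== PRECONDITION & SPEC =====
def Spec_is_pipe_command (command : String) (out : Bool) : Prop := out = is_pipe_command_alt command
instance (command : String) (out : Bool) : Decidable (Spec_is_pipe_command command out) := by unfold Spec_is_pipe_command; infer_instance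

-- ===== CLAIM (what is proved, stated in full; the proofs are below) =====
def Claim_equal_is_pipe_command : Prop := ∀ (command : String), Dom_is_pipe_command command → Spec_is_pipe_command command (is_pipe_command command)

-- ===== LEMMAS AND PROOFS =====

-- proof-level list view of B's loop (state i ↔ the suffix l.drop i)
def pvLoopBL : List Char → Bool
  | [] => false
  | c :: rest =>
    if c = '|' then true
    else if c = '\'' ∨ c = '"' then
      match rest.findIdx? (· = c) with
      | none => false
      | some j => pvLoopBL (rest.drop (j + 1))
    else pvLoopBL rest
termination_by l => l.length
decreasing_by
  · simp [List.length_drop]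
  · simp


theorem pvLoopB_eq_pvLoopBL : ∀ (n : ℕ) (l : List Char) (i : ℕ), l.length - i ≤ n →
    pvLoopB l i = pvLoopBL (l.drop i) := by
  intro n
  induction n with
  | zero =>
    intro l i hl
    rw [pvLoopB, dif_neg (by omega), List.drop_eq_nil_of_le (by omega)]
    simp [pvLoopBL]
  | succ n ih =>
    intro l i hl
    by_cases h : i < l.length
    · rw [pvLoopB, dif_pos h, ← List.getElem_cons_drop h, pvLoopBL]
      by_cases hp : l[i] = '|'
      · simp [hp]
      · simp only [hp, if_false]
        by_cases hq : l[i] = '\'' ∨ l[i] = '"'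
        · simp only [hq, if_true]
          cases hf : (l.drop (i + 1)).findIdx? (· = l[i]) with
          | none => simp
          | some j =>
            simp only
            rw [ih l (i + 1 + j + 1) (by omega), List.drop_drop]
            congr 1
        · simp only [hq, if_false]
          exact ih l (i + 1) (by omega)
    · rw [pvLoopB, dif_neg h, List.drop_eq_nil_of_le (by omega)]
      simp [pvLoopBL]

-- Inside an open quote q, A just scans for the next q and resumes with both flags clear.
theorem pvLoopA_in_single : ∀ l : List Char,
    pvLoopA l true false =
      (match l.findIdx? (· = '\'') with
       | none => false
       | some j => pvLoopA (l.drop (j + 1)) false false) := by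
  intro l
  induction l with
  | nil => simp [pvLoopA]
  | cons c rest ih =>
    by_cases hc : c = '\''
    · subst hc; simp [pvLoopA, List.findIdx?_cons]
    · simp only [pvLoopA, List.findIdx?_cons, hc, if_false,
        and_true, decide_false]
      rw [ih]
      cases rest.findIdx? (· = '\'') with
      | none => simp
      | some j => simp

theorem pvLoopA_in_double : ∀ l : List Char,
    pvLoopA l false true =
      (match l.findIdx? (· = '"') with
       | none => false
       | some j => pvLoopA (l.drop (j + 1)) false false) := by
  intro l
  induction l with
  | nil => simp [pvLoopA]
  | cons c rest ih =>
    by_cases hc : c = '"'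
    · subst hc; simp [pvLoopA, List.findIdx?_cons]
    · simp only [pvLoopA, List.findIdx?_cons, hc, if_false,
        and_true, decide_false]
      rw [ih]
      cases rest.findIdx? (· = '"') with
      | none => simp
      | some j => simp

theorem pvLoopA_eq_pvLoopB : ∀ (n : ℕ) (l : List Char), l.length ≤ n →
    pvLoopA l false false = pvLoopBL l := by
  intro n
  induction n with
  | zero => intro l hl; rw [List.length_eq_zero_iff.mp (Nat.le_zero.mp hl)]; simp [pvLoopA, pvLoopBL]
  | succ n ih =>
    intro l hl
    cases l with
    | nil => simp [pvLoopA, pvLoopBL]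
    | cons c rest =>
      simp only [List.length_cons, Nat.succ_le_succ_iff] at hl
      by_cases hp : c = '|'
      · subst hp; simp [pvLoopA, pvLoopBL]
      · by_cases hs : c = '\''
        · subst hs
          rw [show pvLoopA ('\'' :: rest) false false = pvLoopA rest true false from by
                simp [pvLoopA],
              pvLoopA_in_single rest]
          simp only [pvLoopBL, if_neg (by decide : ¬ ('\'' : Char) = '|'),
            ]
          cases hf : rest.findIdx? (· = '\'') with
          | none => simp
          | some j =>
            simp only
            exact ih _ (by simp [List.length_drop]; omega)
        · by_cases hd : c = '"'
          · subst hd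
            rw [show pvLoopA ('"' :: rest) false false = pvLoopA rest false true from by
                  simp [pvLoopA],
                pvLoopA_in_double rest]
            simp only [pvLoopBL, if_neg (by decide : ¬ ('"' : Char) = '|'),
              ]
            cases hf : rest.findIdx? (· = '"') with
            | none => simp
            | some j =>
              simp only
              exact ih _ (by simp [List.length_drop]; omega)
          · rw [show pvLoopA (c :: rest) false false = pvLoopA rest false false from by
                  simp [pvLoopA, hs, hd, hp],
                pvLoopBL, if_neg hp, if_neg (by simp [hs, hd])]
            exact ih _ hl

-- ===== VERDICT (by name: the statement is the Claim_ definition above) =====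
theorem is_pipe_command_spec : Claim_equal_is_pipe_command := by
  intro command _
  unfold Spec_is_pipe_command is_pipe_command is_pipe_command_alt
  rw [pvLoopB_eq_pvLoopBL command.toList.length command.toList 0 (by omega), List.drop_zero]
  exact pvLoopA_eq_pvLoopB command.toList.length command.toList le_rfl
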